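-- pv_equiv track=rewrite | github.com/feadoor/hackerrank | practice/algorithms/sorting/closest_numbers.py | get_pairs_with_smallest_abs
-- ===== SOURCE A (Python) =====
-- def get_pairs_with_smallest_abs(arr):
--     arr.sort()
--     best_abs, best_pairs = float('inf'), []
--     for ix in range(len(arr) - 1):
--         if abs(arr[ix] - arr[ix + 1]) < best_abs:
--             best_abs = abs(arr[ix] - arr[ix + 1])
--             best_pairs = []
--         if abs(arr[ix] - arr[ix + 1]) == best_abs:
--             best_pairs.extend([arr[ix], arr[ix + 1]])
--     return best_pairs
-- ===== SOURCE B (Python) =====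
-- def get_pairs_with_smallest_abs(arr):
--     # Same in-place sort as A (the caller can observe the mutation).
--     arr.sort()
--     if len(arr) < 2:
--         return []
--     pairs = list(zip(arr, arr[1:]))
--     diffs = [abs(a - b) for (a, b) in pairs]
--     m = min(diffs)
--     out = []
--     for (a, b) in pairs:
--         if abs(a - b) == m:
--             out.extend([a, b])
--     return out
-- ===== Notes on version B (the rewrite author's own statement) =====
-- stated objective: simpler
-- what changed: Replaces A's fused single scan with reset-on-new-minimum state by two plain passes over the adjacent pairs: first compute the minimum adjacent difference with min(), then collect every adjacent pair attaining it.
import Mathlib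
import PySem

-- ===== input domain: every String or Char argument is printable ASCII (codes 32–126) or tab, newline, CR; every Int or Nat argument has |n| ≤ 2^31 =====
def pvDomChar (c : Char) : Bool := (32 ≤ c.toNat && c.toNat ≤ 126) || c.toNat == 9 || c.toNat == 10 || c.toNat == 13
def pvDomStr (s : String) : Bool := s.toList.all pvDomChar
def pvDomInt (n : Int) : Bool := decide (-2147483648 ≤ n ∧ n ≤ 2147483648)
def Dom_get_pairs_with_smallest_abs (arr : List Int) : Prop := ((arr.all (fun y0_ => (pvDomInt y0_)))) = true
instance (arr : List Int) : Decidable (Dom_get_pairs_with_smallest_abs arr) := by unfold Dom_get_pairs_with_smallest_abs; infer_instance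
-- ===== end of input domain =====

-- B replaces A's fused scan-with-reset by two plain passes (min of adjacent diffs, then collect);
-- equivalence is about the RETURN value only (both Pythons sort `arr` in place identically).

-- ===== PORT A =====
-- one loop iteration of A: best_abs = none encodes float('inf')
def pvStepA (st : Option Int × List Int) (a b : Int) : Option Int × List Int :=
  let st1 := if (match st.1 with | none => true | some ba => decide (|a - b| < ba)) then
      (some |a - b|, ([] : List Int)) else st
  if (match st1.1 with | none => false | some ba => decide (|a - b| = ba)) then
      (st1.1, st1.2 ++ [a, b]) else st1

def get_pairs_with_smallest_abs (arr : List Int) : List Int :=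
  let s := PySem.List.sorted arr (fun x => x) false
  ((PySem.List.pyRange 0 (PySem.List.len s - 1) 1).foldl
    (fun st ix => pvStepA st (PySem.List.pyGetD s ix 0) (PySem.List.pyGetD s (ix + 1) 0))
    (none, [])).2

-- ===== PORT B =====
def get_pairs_with_smallest_abs_alt (arr : List Int) : List Int :=
  let s := PySem.List.sorted arr (fun x => x) false
  if PySem.List.len s < 2 then [] else
    let pairs := s.zip (s.drop 1)   -- zip(arr, arr[1:]); arr[1:] is exactly drop 1
    let diffs := pairs.map (fun p => |p.1 - p.2|)
    match PySem.List.min? diffs (fun x => x) with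
    | none => []   -- unreachable: diffs nonempty under the length guard
    | some m => pairs.foldl (fun out p => if |p.1 - p.2| = m then out ++ [p.1, p.2] else out) []

-- ===== PRECONDITION & SPEC =====
def Spec_get_pairs_with_smallest_abs (arr : List Int) (out : List Int) : Prop := out = get_pairs_with_smallest_abs_alt arr
instance (arr : List Int) (out : List Int) : Decidable (Spec_get_pairs_with_smallest_abs arr out) := by unfold Spec_get_pairs_with_smallest_abs; infer_instance

-- ===== CLAIM (what is proved, stated in full; the proofs are below) =====
def Claim_equal_get_pairs_with_smallest_abs : Prop := ∀ (arr : List Int), Dom_get_pairs_with_smallest_abs arr → Spec_get_pairs_with_smallest_abs arr (get_pairs_with_smallest_abs arr)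

-- ===== LEMMAS AND PROOFS =====

-- running minimum of adjacent-pair absolute differences
def pvMn (b : Int) (ps : List (Int × Int)) : Int := ps.foldl (fun b p => min b |p.1 - p.2|) b
-- all pairs attaining difference m, flattened in order
def pvColl (m : Int) (ps : List (Int × Int)) : List Int :=
  ps.flatMap (fun p => if |p.1 - p.2| = m then [p.1, p.2] else [])

theorem pvMn_le (ps : List (Int × Int)) (b : Int) : pvMn b ps ≤ b := by
  induction ps generalizing b with
  | nil => simp [pvMn]
  | cons p t ih =>
    have := ih (min b |p.1 - p.2|)
    simp only [pvMn, List.foldl_cons] at *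
    exact le_trans this (min_le_left _ _)

-- characterisation of A's fused loop from a finite best_abs
theorem pvFoldA_char (ps : List (Int × Int)) : ∀ (b : Int) (acc : List Int),
    ps.foldl (fun st p => pvStepA st p.1 p.2) (some b, acc)
    = (some (pvMn b ps), (if pvMn b ps = b then acc else []) ++ pvColl (pvMn b ps) ps) := by
  induction ps with
  | nil => intro b acc; simp [pvMn, pvColl]
  | cons p t ih =>
    intro b acc
    set d := |p.1 - p.2| with hd
    rcases lt_trichotomy d b with h | h | h
    · have hstep : pvStepA (some b, acc) p.1 p.2 = (some d, [p.1, p.2]) := by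
        simp [pvStepA, ← hd, h]
      have hmn : pvMn b (p :: t) = pvMn d t := by
        simp [pvMn, ← hd, min_eq_right (le_of_lt h)]
      have hne : pvMn d t ≠ b := by
        have := pvMn_le t d; omega
      rw [List.foldl_cons, hstep, ih d [p.1, p.2], hmn]
      have hcoll : pvColl (pvMn d t) (p :: t)
          = (if d = pvMn d t then [p.1, p.2] else []) ++ pvColl (pvMn d t) t := by
        simp [pvColl, ← hd]
      rw [hcoll]
      simp only [if_neg hne, List.nil_append]
      by_cases hq : pvMn d t = d
      · simp [hq]
      · rw [if_neg hq, if_neg (fun hh => hq hh.symm), List.nil_append]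
    · have hstep : pvStepA (some b, acc) p.1 p.2 = (some b, acc ++ [p.1, p.2]) := by
        simp [pvStepA, ← hd, h]
      have hmn : pvMn b (p :: t) = pvMn b t := by
        simp [pvMn, ← hd, h]
      rw [List.foldl_cons, hstep, ih b (acc ++ [p.1, p.2]), hmn]
      have hcoll : pvColl (pvMn b t) (p :: t)
          = (if d = pvMn b t then [p.1, p.2] else []) ++ pvColl (pvMn b t) t := by
        simp [pvColl, ← hd]
      rw [hcoll]
      by_cases hq : pvMn b t = b
      · rw [if_pos hq, if_pos hq, if_pos (by omega : d = pvMn b t)]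
        simp
      · have : pvMn b t ≤ b := pvMn_le t b
        rw [if_neg hq, if_neg hq, if_neg (by omega : ¬ d = pvMn b t), List.nil_append,
          List.nil_append]
    · have hlt : ¬ (d < b) := by omega
      have hne : ¬ (d = b) := by omega
      have hstep : pvStepA (some b, acc) p.1 p.2 = (some b, acc) := by
        simp [pvStepA, ← hd, hlt, hne]
      have hmn : pvMn b (p :: t) = pvMn b t := by
        simp [pvMn, ← hd, min_eq_left (le_of_lt h)]
      rw [List.foldl_cons, hstep, ih b acc, hmn]
      have : pvMn b t ≤ b := pvMn_le t b
      have hcoll : pvColl (pvMn b t) (p :: t)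
          = (if d = pvMn b t then [p.1, p.2] else []) ++ pvColl (pvMn b t) t := by
        simp [pvColl, ← hd]
      rw [hcoll, if_neg (by omega : ¬ d = pvMn b t), List.nil_append]

-- pure-Nat form: an index loop over range(len-1) reading s[k], s[k+1] is the loop over adjacent pairs
theorem pvFoldIdxNat {b : Type} (s : List Int) (f : b -> Int -> Int -> b) :
    forall (init : b), (List.range (s.length - 1)).foldl
      (fun st k => f st (s.getD k 0) (s.getD (k+1) 0)) init
    = (s.zip (s.drop 1)).foldl (fun st p => f st p.1 p.2) init := by
  induction s with
  | nil => intro init; simp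
  | cons a t ih =>
    intro init
    cases t with
    | nil => simp
    | cons c t' =>
      have hlen : (a :: c :: t').length - 1 = t'.length + 1 := by simp
      rw [hlen, List.range_succ_eq_map, List.foldl_cons, List.foldl_map]
      have hz : (a :: c :: t').zip ((a :: c :: t').drop 1) = (a, c) :: (c :: t').zip t' := by simp
      rw [hz, List.foldl_cons]
      have h := ih (f init a c)
      simp only [List.length_cons, Nat.add_sub_cancel, List.drop_one, List.tail_cons] at h
      simp only [Nat.succ_eq_add_one, List.getD_cons_succ, List.getD_cons_zero]
      exact h

-- A's pyRange/pyGetD index loop reduces to the pure-Nat index loop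
theorem pvFoldIdx {b : Type} (s : List Int) (f : b -> Int -> Int -> b) (init : b) :
    (PySem.List.pyRange 0 (PySem.List.len s - 1) 1).foldl
      (fun st ix => f st (PySem.List.pyGetD s ix 0) (PySem.List.pyGetD s (ix + 1) 0)) init
    = (s.zip (s.drop 1)).foldl (fun st p => f st p.1 p.2) init := by
  cases s with
  | nil =>
    rw [PySem.List.pyRange_one_eq_nil (by simp [PySem.List.len] : (PySem.List.len ([] : List Int)) - 1 <= 0)]
    simp
  | cons a t =>
    have hlen : PySem.List.len (a :: t) - 1 = (((a :: t).length - 1 : Nat) : Int) := by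
      simp [PySem.List.len]
    rw [hlen, PySem.List.pyRange_zero_natCast, List.foldl_map]
    rw [← pvFoldIdxNat (a :: t) f init]
    apply PySem.List.foldl_congr_mem
    intro st k _
    have h1 : ((k : Nat) : Int) + 1 = ((k + 1 : Nat) : Int) := by push_cast; ring
    rw [h1, PySem.List.pyGetD_natCast, PySem.List.pyGetD_natCast]

-- ===== VERDICT (by name: the statement is the Claim_ definition above) =====
theorem get_pairs_with_smallest_abs_spec : Claim_equal_get_pairs_with_smallest_abs := by
  intro arr _
  unfold Spec_get_pairs_with_smallest_abs get_pairs_with_smallest_abs get_pairs_with_smallest_abs_alt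
  dsimp only
  generalize PySem.List.sorted arr (fun x => x) false = s
  rw [pvFoldIdx s (fun st a b => pvStepA st a b) (none, [])]
  cases hsz : s.zip (s.drop 1) with
  | nil =>
    have hlt : PySem.List.len s < 2 := by
      rcases s with _ | ⟨a, _ | ⟨c, t⟩⟩ <;> simp_all [PySem.List.len]
    rw [if_pos hlt]
    simp
  | cons p z =>
    have hlen2 : ¬ PySem.List.len s < 2 := by
      rcases s with _ | ⟨a, _ | ⟨c, t⟩⟩ <;> simp_all [PySem.List.len]
    rw [if_neg hlen2]
    -- A side: peel the first pair, then apply the loop characterisation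
    have hfirst : pvStepA (none, []) p.1 p.2 = (some |p.1 - p.2|, [p.1, p.2]) := by
      simp [pvStepA]
    rw [List.foldl_cons, hfirst, pvFoldA_char z |p.1 - p.2| [p.1, p.2]]
    -- B side: min() is the running-min fold, the collecting loop is a flatMap
    rw [List.map_cons, PySem.List.min?_id_cons]
    have hmin : (z.map (fun q => |q.1 - q.2|)).foldl min |p.1 - p.2| = pvMn |p.1 - p.2| z := by
      rw [List.foldl_map]; rfl
    rw [hmin]
    set m := pvMn |p.1 - p.2| z with hm
    have hb : (fun (out : List Int) (q : Int × Int) =>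
        if |q.1 - q.2| = m then out ++ [q.1, q.2] else out)
        = (fun out q => out ++ (if |q.1 - q.2| = m then [q.1, q.2] else [])) := by
      funext out q; split <;> simp
    show (some m, (if m = |p.1 - p.2| then [p.1, p.2] else []) ++ pvColl m z).2
      = List.foldl (fun out q => if |q.1 - q.2| = m then out ++ [q.1, q.2] else out) [] (p :: z)
    rw [hb, PySem.List.foldl_append_eq_flatMap]
    show (if m = |p.1 - p.2| then [p.1, p.2] else []) ++ pvColl m z
      = [] ++ (p :: z).flatMap (fun q => if |q.1 - q.2| = m then [q.1, q.2] else [])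
    rw [List.nil_append, List.flatMap_cons]
    by_cases hq : m = |p.1 - p.2|
    · rw [if_pos hq, if_pos hq.symm]; rfl
    · rw [if_neg hq, if_neg (fun hh => hq hh.symm), List.nil_append]; rfl
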